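-- pv_equiv track=rewrite | github.com/Temuujin-Munkhtsetseg/knowledge-graph | packages/gkg-evals/pipeline/src/cross_run_analysis/analysis.py | find_matching_worktree_paths
-- ===== SOURCE A (Python) =====
-- from typing import List, Set
--
-- def find_matching_worktree_paths(diff_paths: List[str], file_access_order: List[str]) -> List[str]:
--     """
--     Find worktree paths in file_access_order that match the diff paths.
--
--     Args:
--         diff_paths: List of file paths from the diff
--         file_access_order: List of accessed file paths (may contain worktree paths)
--
--     Returns:
--         List of matching worktree paths
--     """
--     matching_paths = []
--
--     for diff_path in diff_paths:
--         # Look for file_access_order entries that end with the diff_path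
--         for access_path in file_access_order:
--             if '/worktrees/' in access_path and access_path.endswith(diff_path):
--                 matching_paths.append(access_path)
--                 break  # Only take the first match for each diff_path
--
--     return matching_paths
-- ===== SOURCE B (Python) =====
-- def find_matching_worktree_paths(diff_paths, file_access_order):
--     # Index every suffix of each worktree-containing access path by its first
--     # occurrence, then answer each diff_path with one dictionary lookup.
--     first_by_suffix = {}
--     for access_path in file_access_order:
--         if '/worktrees/' in access_path:
--             for j in range(len(access_path) + 1):
--                 suffix = access_path[j:]
--                 if suffix not in first_by_suffix:
--                     first_by_suffix[suffix] = access_path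
--     matching_paths = []
--     for diff_path in diff_paths:
--         match = first_by_suffix.get(diff_path)
--         if match is not None:
--             matching_paths.append(match)
--     return matching_paths
-- ===== Notes on version B (the rewrite author's own statement) =====
-- stated objective: faster
-- what changed: B replaces the per-diff-path linear scan of file_access_order (with an endswith test per entry) by a dictionary built once that maps every suffix of each worktree-containing access path to its first such path, so each diff_path is answered by one hash lookup.
import Mathlib
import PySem

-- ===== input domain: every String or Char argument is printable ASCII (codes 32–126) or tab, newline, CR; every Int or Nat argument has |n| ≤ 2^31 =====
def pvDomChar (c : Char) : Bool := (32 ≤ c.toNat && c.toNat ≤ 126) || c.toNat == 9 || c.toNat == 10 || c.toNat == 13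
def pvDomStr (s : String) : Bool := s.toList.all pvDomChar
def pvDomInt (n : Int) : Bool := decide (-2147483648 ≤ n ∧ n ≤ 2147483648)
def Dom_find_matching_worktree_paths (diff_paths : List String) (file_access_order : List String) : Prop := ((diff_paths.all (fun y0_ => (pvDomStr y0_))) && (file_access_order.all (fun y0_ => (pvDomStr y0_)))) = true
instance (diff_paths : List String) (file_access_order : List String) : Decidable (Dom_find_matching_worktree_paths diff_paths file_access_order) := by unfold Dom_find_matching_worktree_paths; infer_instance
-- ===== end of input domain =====

-- B builds a suffix→first-worktree-path dictionary once and answers each diff_path by one lookup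
-- (asymptotically faster than A's per-diff-path scan); equal return value proved on all inputs.

-- ===== PORT A =====
-- A's inner 'for … break' loop: first access_path containing '/worktrees/' and ending with diff_path
def pvFirstMatchA (diff_path : String) : List String → Option String
  | [] => none
  | access_path :: rest =>
    if PySem.Str.isIn "/worktrees/" access_path && PySem.Str.endswith access_path diff_path
    then some access_path else pvFirstMatchA diff_path rest

def find_matching_worktree_paths (diff_paths : List String) (file_access_order : List String) : List String :=
  diff_paths.foldl (fun matching_paths diff_path =>
    match pvFirstMatchA diff_path file_access_order with
    | some p => matching_paths ++ [p]
    | none => matching_paths) []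

-- ===== PORT B =====
-- Source B's inner loop: for j in range(len(access_path)+1): insert suffix if absent
def pvIndexPath (access_path : String) (d : PySem.Dict String String) : PySem.Dict String String :=
  (PySem.List.pyRange 0 (PySem.Str.len access_path + 1) 1).foldl
    (fun d j =>
      let suffix := PySem.Str.slice access_path (some j) none
      if d.contains suffix then d else d.insert suffix access_path) d

def find_matching_worktree_paths_alt (diff_paths : List String) (file_access_order : List String) : List String :=
  let first_by_suffix := file_access_order.foldl
    (fun d access_path =>
      if PySem.Str.isIn "/worktrees/" access_path then pvIndexPath access_path d else d)
    PySem.Dict.empty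
  diff_paths.foldl (fun matching_paths diff_path =>
    match first_by_suffix.get? diff_path with
    | some m => matching_paths ++ [m]
    | none => matching_paths) []

-- ===== PRECONDITION & SPEC =====
def Spec_find_matching_worktree_paths (diff_paths : List String) (file_access_order : List String) (out : List String) : Prop := out = find_matching_worktree_paths_alt diff_paths file_access_order
instance (diff_paths : List String) (file_access_order : List String) (out : List String) : Decidable (Spec_find_matching_worktree_paths diff_paths file_access_order out) := by unfold Spec_find_matching_worktree_paths; infer_instance

-- ===== CLAIM (what is proved, stated in full; the proofs are below) =====
def Claim_equal_find_matching_worktree_paths : Prop := ∀ (diff_paths : List String) (file_access_order : List String), Dom_find_matching_worktree_paths diff_paths file_access_order → Spec_find_matching_worktree_paths diff_paths file_access_order (find_matching_worktree_paths diff_paths file_access_order)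

-- ===== LEMMAS AND PROOFS =====

-- one insert-if-absent step, as a lookup transformer
lemma pv_get?_step (p s : String) (d : PySem.Dict String String) (k : String) :
    ((if d.contains s then d else d.insert s p).get? k)
      = (d.get? k).or (if s = k then some p else none) := by
  by_cases hc : d.contains s = true
  · rw [if_pos hc]
    by_cases hk : s = k
    · subst hk
      have : (d.get? s).isSome := by
        rw [← PySem.Dict.contains_eq_isSome_get?]; exact hc
      obtain ⟨v, hv⟩ := Option.isSome_iff_exists.mp this
      simp [hv]
    · simp [hk]
  · rw [if_neg hc]
    have hnone : d.get? s = none := by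
      rw [PySem.Dict.get?_eq_none_iff_contains]
      simpa using hc
    by_cases hk : s = k
    · subst hk
      simp [PySem.Dict.get?_insert_self, hnone]
    · rw [PySem.Dict.get?_insert_of_ne _ _ (Ne.symm hk)]
      simp [hk]

-- insert-if-absent over the index loop: first occurrence wins
lemma pv_get?_foldl_idx (js : List Int) (p : String) (d : PySem.Dict String String) (k : String) :
    ((js.foldl (fun d j =>
        let suffix := PySem.Str.slice p (some j) none
        if d.contains suffix then d else d.insert suffix p) d).get? k)
      = (d.get? k).or
          (if ∃ j ∈ js, PySem.Str.slice p (some j) none = k then some p else none) := by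
  induction js generalizing d with
  | nil => simp
  | cons j rest ih =>
    simp only [List.foldl_cons]
    rw [ih]
    rw [pv_get?_step, Option.or_assoc]
    congr 1
    by_cases hj : PySem.Str.slice p (some j) none = k
    · simp [hj]
    · by_cases hr : ∃ x ∈ rest, PySem.Str.slice p (some x) none = k
      · simp [hj, hr]
      · simp [hj, hr]

-- the suffix slices of access_path are exactly its (list) suffixes
lemma pv_mem_suffixes (p k : String) :
    (∃ j ∈ PySem.List.pyRange 0 ((PySem.Str.len p : Int) + 1) 1,
        PySem.Str.slice p (some j) none = k) ↔ PySem.Str.endswith p k = true := by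
  have hend : PySem.Str.endswith p k = true ↔ k.toList <:+ p.toList := by
    rw [PySem.Str.endswith_eq, PySem.Chars.endswith_iff]
  rw [hend]
  constructor
  · rintro ⟨j, hj, hs⟩
    rw [PySem.List.mem_pyRange_one] at hj
    obtain ⟨h0, hlt⟩ := hj
    have : k.toList = p.toList.drop j.toNat := by
      have := congrArg String.toList hs
      simp only [PySem.Str.toList_slice, PySem.Chars.slice_eq_listSlice] at this
      rw [← this, PySem.List.slice_from _ h0]
    rw [this]
    exact List.drop_suffix _ _
  · rintro ⟨t, ht⟩
    refine ⟨(t.length : Int), ?_, ?_⟩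
    · rw [PySem.List.mem_pyRange_one]
      constructor
      · exact Int.natCast_nonneg _
      · have : t.length ≤ p.toList.length := by
          rw [← ht]; simp
        simp only [PySem.Str.len_eq]
        omega
    · apply String.ext
      simp only [PySem.Str.toList_slice, PySem.Chars.slice_eq_listSlice,
        PySem.List.slice_from_natCast]
      rw [← ht]
      simp

-- B's indexing of one path, as a lookup transformer
lemma pv_get?_pvIndexPath (p : String) (d : PySem.Dict String String) (k : String) :
    (pvIndexPath p d).get? k
      = (d.get? k).or (if PySem.Str.endswith p k then some p else none) := by
  unfold pvIndexPath
  rw [pv_get?_foldl_idx]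
  congr 1
  by_cases he : PySem.Str.endswith p k = true
  · rw [if_pos he, if_pos]
    rw [pv_mem_suffixes]
    exact he
  · rw [if_neg he, if_neg]
    rw [pv_mem_suffixes]
    exact he

-- B's dictionary answers exactly A's first-match scan
lemma pv_get?_build (fao : List String) (d : PySem.Dict String String) (k : String) :
    ((fao.foldl (fun d access_path =>
        if PySem.Str.isIn "/worktrees/" access_path then pvIndexPath access_path d else d) d).get? k)
      = (d.get? k).or (pvFirstMatchA k fao) := by
  induction fao generalizing d with
  | nil => simp [pvFirstMatchA]
  | cons p rest ih =>
    simp only [List.foldl_cons]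
    rw [ih]
    by_cases hw : PySem.Str.isIn "/worktrees/" p = true
    · rw [if_pos hw, pv_get?_pvIndexPath, Option.or_assoc]
      congr 1
      conv_rhs => rw [pvFirstMatchA]
      rw [hw, Bool.true_and]
      by_cases he : PySem.Str.endswith p k = true
      · rw [if_pos he, if_pos he, Option.some_or]
      · rw [if_neg he, if_neg he, Option.none_or]
    · rw [if_neg hw]
      congr 1
      conv_rhs => rw [pvFirstMatchA]
      rw [Bool.eq_false_iff.mpr hw, Bool.false_and, if_neg]
      simp

-- ===== VERDICT (by name: the statement is the Claim_ definition above) =====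
theorem find_matching_worktree_paths_spec : Claim_equal_find_matching_worktree_paths := by
  intro diff_paths file_access_order _
  unfold Spec_find_matching_worktree_paths
  unfold find_matching_worktree_paths find_matching_worktree_paths_alt
  have h : ∀ k, ((file_access_order.foldl (fun d access_path =>
      if PySem.Str.isIn "/worktrees/" access_path then pvIndexPath access_path d else d)
      PySem.Dict.empty).get? k) = pvFirstMatchA k file_access_order := by
    intro k
    rw [pv_get?_build]
    simp
  simp only [h]
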